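-- pv_equiv track=rewrite | github.com/Aakashneeli/AI-game-builder-agent | agentic_game_builder/clarification.py | _motion_hint
-- ===== SOURCE A (Python) =====
-- def _motion_hint(lower_prompt: str, detected_perspective: str | None) -> str:
--     if detected_perspective == "side-view" or any(word in lower_prompt for word in ("jump", "runner", "platform", "course")):
--         return "runner"
--     if any(word in lower_prompt for word in ("traffic", "lane", "crossing", "highway", "road")):
--         return "lanes"
--     if any(word in lower_prompt for word in ("heist", "vault", "steal", "data", "drone")):
--         return "heist"
--     return "free"
-- ===== SOURCE B (Python) =====
-- KEYWORDS = {
--     "jump": 0, "runner": 0, "platform": 0, "course": 0,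
--     "traffic": 1, "lane": 1, "crossing": 1, "highway": 1, "road": 1,
--     "heist": 2, "vault": 2, "steal": 2, "data": 2, "drone": 2,
-- }
-- LABELS = ("runner", "lanes", "heist", "free")
--
--
-- def _motion_hint(lower_prompt, detected_perspective):
--     # Compute the minimal matching rule rank in one exhaustive pass; the
--     # side-view override just seeds the accumulator at rank 0.
--     rank = 0 if detected_perspective == "side-view" else len(LABELS) - 1
--     for word, group in KEYWORDS.items():
--         if group < rank and word in lower_prompt:
--             rank = group
--     return LABELS[rank]
-- ===== Notes on version B (the rewrite author's own statement) =====
-- stated objective: alternative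
-- what changed: Replaces the short-circuiting cascade of three any()-checks with a single exhaustive pass over a flat keyword-to-rank dict that maintains a minimum-rank accumulator (seeded 0 by the side-view override) and then indexes a labels tuple by that rank.
import Mathlib
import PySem

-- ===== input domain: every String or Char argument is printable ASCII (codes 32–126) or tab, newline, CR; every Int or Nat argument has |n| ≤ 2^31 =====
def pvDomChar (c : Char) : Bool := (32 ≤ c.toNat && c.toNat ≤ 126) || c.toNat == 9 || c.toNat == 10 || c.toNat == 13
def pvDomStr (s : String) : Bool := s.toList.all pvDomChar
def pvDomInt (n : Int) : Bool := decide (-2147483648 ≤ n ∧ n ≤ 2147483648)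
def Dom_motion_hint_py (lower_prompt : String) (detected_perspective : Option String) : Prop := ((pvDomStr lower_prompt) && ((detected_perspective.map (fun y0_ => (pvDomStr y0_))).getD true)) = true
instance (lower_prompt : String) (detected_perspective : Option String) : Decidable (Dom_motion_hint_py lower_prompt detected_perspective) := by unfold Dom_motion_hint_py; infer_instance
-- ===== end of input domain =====

-- B replaces the short-circuiting cascade of any()-checks with one exhaustive pass over a
-- flat keyword→rank dict keeping a minimum-rank accumulator, then indexes a labels tuple
-- (objective: alternative — same cost, different formulation).


-- ===== PORT A =====
def motion_hint_py (lower_prompt : String) (detected_perspective : Option String) : String :=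
  if detected_perspective == some "side-view"
      || (["jump", "runner", "platform", "course"].any (fun word => PySem.Str.isIn word lower_prompt)) then
    "runner"
  else if ["traffic", "lane", "crossing", "highway", "road"].any (fun word => PySem.Str.isIn word lower_prompt) then
    "lanes"
  else if ["heist", "vault", "steal", "data", "drone"].any (fun word => PySem.Str.isIn word lower_prompt) then
    "heist"
  else
    "free"

-- ===== PORT B =====
-- the flat KEYWORDS dict of Source B (insertion order)
def motionKeywords : List (String × Nat) :=
  [("jump", 0), ("runner", 0), ("platform", 0), ("course", 0),
   ("traffic", 1), ("lane", 1), ("crossing", 1), ("highway", 1), ("road", 1),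
   ("heist", 2), ("vault", 2), ("steal", 2), ("data", 2), ("drone", 2)]

def motionLabels : List String := ["runner", "lanes", "heist", "free"]

-- one loop iteration of Source B: keep the minimum matching rank
def motionStep (lower_prompt : String) (r : Nat) (wg : String × Nat) : Nat :=
  if wg.2 < r && PySem.Str.isIn wg.1 lower_prompt then wg.2 else r

def motion_hint_py_alt (lower_prompt : String) (detected_perspective : Option String) : String :=
  let rank := motionKeywords.foldl (motionStep lower_prompt)
      (if detected_perspective == some "side-view" then 0 else motionLabels.length - 1)
  (PySem.List.pyGet? motionLabels (rank : Int)).getD ""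

-- ===== PRECONDITION & SPEC =====
def Spec_motion_hint_py (lower_prompt : String) (detected_perspective : Option String) (out : String) : Prop := out = motion_hint_py_alt lower_prompt detected_perspective
instance (lower_prompt : String) (detected_perspective : Option String) (out : String) : Decidable (Spec_motion_hint_py lower_prompt detected_perspective out) := by unfold Spec_motion_hint_py; infer_instance

-- ===== CLAIM (what is proved, stated in full; the proofs are below) =====
def Claim_equal_motion_hint_py : Prop := ∀ (lower_prompt : String) (detected_perspective : Option String), Dom_motion_hint_py lower_prompt detected_perspective → Spec_motion_hint_py lower_prompt detected_perspective (motion_hint_py lower_prompt detected_perspective)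

-- ===== LEMMAS AND PROOFS =====

-- folding one keyword group (all with the same rank g) over accumulator r
theorem motion_foldl_group (lp : String) (ws : List String) (g r : Nat) :
    (ws.map (fun w => (w, g))).foldl (motionStep lp) r
      = if (ws.any (fun w => PySem.Str.isIn w lp)) && decide (g < r) then g else r := by
  induction ws generalizing r with
  | nil => simp
  | cons w rest ih =>
      rw [List.map_cons, List.foldl_cons, ih, List.any_cons]
      cases hin : PySem.Str.isIn w lp <;>
        cases hr : rest.any (fun w => PySem.Str.isIn w lp) <;>
        by_cases hlt : g < r <;>
        simp_all [motionStep] <;> first | omega | (split_ifs <;> omega)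

theorem motionKeywords_split :
    motionKeywords
      = (["jump", "runner", "platform", "course"].map (fun w => (w, 0)))
        ++ (["traffic", "lane", "crossing", "highway", "road"].map (fun w => (w, 1)))
        ++ (["heist", "vault", "steal", "data", "drone"].map (fun w => (w, 2))) := rfl

-- ===== VERDICT (by name: the statement is the Claim_ definition above) =====
theorem motion_hint_py_spec : Claim_equal_motion_hint_py := by
  intro lp dp _
  unfold Spec_motion_hint_py motion_hint_py motion_hint_py_alt
  rw [motionKeywords_split]
  simp only [List.foldl_append, motion_foldl_group]
  by_cases hsv : dp == some "side-view" <;>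
    cases h0 : ["jump", "runner", "platform", "course"].any (fun w => PySem.Str.isIn w lp) <;>
    cases h1 : ["traffic", "lane", "crossing", "highway", "road"].any (fun w => PySem.Str.isIn w lp) <;>
    cases h2 : ["heist", "vault", "steal", "data", "drone"].any (fun w => PySem.Str.isIn w lp) <;>
    simp_all [motionLabels, PySem.List.pyGet?, PySem.List.pyIdx?]
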